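-- pv_equiv track=rewrite | github.com/67-68/Time-Integrator | Main/parseInput.py | parseDataIntoList
-- ===== SOURCE A (Python) =====
-- def parseDataIntoList(userData):
--     actions = []
--     for i in range (1,len(userData)-1,2):
--         start = userData[i-1]
--         end = userData[i+1]
--         action = userData[i]
--         actions.append({
--             "start":start,
--             "action":action,
--             "end":end
--         })
--     return actions
-- ===== SOURCE B (Python) =====
-- def parseDataIntoList(userData):
--     # One pass, no index arithmetic: carry the pending (start, action) and
--     # close a window whenever its end arrives; the end becomes the next start.
--     actions = []
--     start = None
--     action = None
--     for x in userData:
--         if start is None: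
--             start = x
--         elif action is None:
--             action = x
--         else:
--             actions.append({"start": start, "action": action, "end": x})
--             start, action = x, None
--     return actions
-- ===== Notes on version B (the rewrite author's own statement) =====
-- stated objective: alternative
-- what changed: A walks indices 1,3,5,... with a stride-2 range and reads userData[i-1]/[i]/[i+1]; B makes a single element-wise pass with a pending (start, action) state and no index arithmetic, closing a window when its end element arrives.
import Mathlib
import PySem

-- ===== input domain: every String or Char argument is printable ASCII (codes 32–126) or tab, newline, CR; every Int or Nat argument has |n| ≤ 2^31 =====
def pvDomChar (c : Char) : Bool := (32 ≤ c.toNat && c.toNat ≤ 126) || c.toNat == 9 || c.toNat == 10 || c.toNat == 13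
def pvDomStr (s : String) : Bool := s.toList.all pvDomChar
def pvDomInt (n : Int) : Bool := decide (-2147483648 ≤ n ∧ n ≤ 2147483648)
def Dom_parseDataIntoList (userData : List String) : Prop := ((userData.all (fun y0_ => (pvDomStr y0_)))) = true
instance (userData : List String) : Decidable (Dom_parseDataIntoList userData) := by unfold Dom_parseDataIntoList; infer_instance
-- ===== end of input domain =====

-- B replaces A's range-stepped index loop by a single pass that carries the pending (start, action)
-- state and closes a window when its end arrives; same return value, no index arithmetic (objective: alternative).

-- ===== PORT A =====
-- for i in range(1, len(userData)-1, 2): append {"start": userData[i-1], "action": userData[i], "end": userData[i+1]}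
-- (every index is in range for every i the range produces, so A never raises; pyGetD's default is unreachable)
def parseDataIntoList (userData : List String) : List (List (String × String)) :=
  (PySem.List.pyRange 1 ((userData.length : Int) - 1) 2).foldl
    (fun actions i =>
      actions ++ [[("start", PySem.List.pyGetD userData (i - 1) ""),
                   ("action", PySem.List.pyGetD userData i ""),
                   ("end", PySem.List.pyGetD userData (i + 1) "")]])
    []

-- ===== PORT B =====
-- fold over the elements with state (actions, start?, action?), exactly Source B's three branches
def parseDataIntoList_alt (userData : List String) : List (List (String × String)) :=
  (userData.foldl
    (fun st x =>
      match st with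
      | (actions, none, act) => (actions, some x, act)
      | (actions, some s, none) => (actions, some s, some x)
      | (actions, some s, some a) =>
          (actions ++ [[("start", s), ("action", a), ("end", x)]], some x, none))
    ([], none, none)).1

-- ===== PRECONDITION & SPEC =====
def Spec_parseDataIntoList (userData : List String) (out : List (List (String × String))) : Prop := out = parseDataIntoList_alt userData
instance (userData : List String) (out : List (List (String × String))) : Decidable (Spec_parseDataIntoList userData out) := by unfold Spec_parseDataIntoList; infer_instance

-- ===== CLAIM (what is proved, stated in full; the proofs are below) =====
def Claim_equal_parseDataIntoList : Prop := ∀ (userData : List String), Dom_parseDataIntoList userData → Spec_parseDataIntoList userData (parseDataIntoList userData)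

-- ===== LEMMAS AND PROOFS =====

-- reference recursion: both programs compute this two-step sliding window
def pvChunks : List String → List (List (String × String))
  | [] => []
  | [_] => []
  | [_, _] => []
  | s :: a :: e :: t =>
      [("start", s), ("action", a), ("end", e)] :: pvChunks (e :: t)

def pvStep (st : List (List (String × String)) × Option String × Option String) (x : String) :
    List (List (String × String)) × Option String × Option String :=
  match st with
  | (actions, none, act) => (actions, some x, act)
  | (actions, some s, none) => (actions, some s, some x)
  | (actions, some s, some a) =>
      (actions ++ [[("start", s), ("action", a), ("end", x)]], some x, none)

lemma pvAlt_step_eq (userData : List String) :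
    parseDataIntoList_alt userData = (userData.foldl pvStep ([], none, none)).1 := by
  unfold parseDataIntoList_alt
  congr 1

lemma pvFoldB (t : List String) :
    (∀ acc s, (t.foldl pvStep (acc, some s, none)).1 = acc ++ pvChunks (s :: t)) ∧
    (∀ acc s a, (t.foldl pvStep (acc, some s, some a)).1 = acc ++ pvChunks (s :: a :: t)) := by
  induction t with
  | nil => simp [pvChunks]
  | cons x t ih =>
    refine ⟨?_, ?_⟩
    · intro acc s
      simpa [pvStep] using ih.2 acc s x
    · intro acc s a
      have := ih.1 (acc ++ [[("start", s), ("action", a), ("end", x)]]) x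
      simpa [pvStep, pvChunks] using this

lemma pvB_eq_chunks (userData : List String) :
    parseDataIntoList_alt userData = pvChunks userData := by
  rw [pvAlt_step_eq]
  cases userData with
  | nil => simp [pvChunks]
  | cons y t =>
    have h := (pvFoldB t).1 [] y
    simpa [pvStep] using h

lemma pvA_cons (s a e : String) (t : List String) :
    parseDataIntoList (s :: a :: e :: t) =
      [("start", s), ("action", a), ("end", e)] :: parseDataIntoList (e :: t) := by
  unfold parseDataIntoList
  rw [PySem.List.foldl_append_singleton_eq_map, PySem.List.foldl_append_singleton_eq_map]
  simp only [List.nil_append, List.length_cons]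
  rw [PySem.List.pyRange_of_pos 1 _ (by norm_num), PySem.List.pyRange_of_pos 1 _ (by norm_num)]
  push_cast
  have h2 : (if (1:Int) < (t.length : Int) + 1 + 1 + 1 - 1 then ((((t.length : Int) + 1 + 1 + 1 - 1) - 1 + 2 - 1) / 2).toNat else 0) = t.length / 2 + 1 := by
    rw [if_pos (by omega)]; omega
  have h3 : (if (1:Int) < (t.length : Int) + 1 - 1 then ((((t.length : Int) + 1 - 1) - 1 + 2 - 1) / 2).toNat else 0) = t.length / 2 := by
    split_ifs with h
    · omega
    · omega
  rw [h2, h3, List.range_succ_eq_map]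
  simp only [List.map_cons, List.map_map]
  refine congrArg₂ _ ?_ ?_
  · simp [PySem.List.pyGetD, PySem.List.pyGet?, PySem.List.pyIdx?,
          show (0:Int) ≤ (t.length:Int)+1+1 from by omega,
          show (0:Int) ≤ (t.length:Int)+1 from by omega,
          show (2:Int) ≤ (t.length:Int)+1+1 from by omega]
  · refine List.map_congr_left (fun k _ => ?_)
    simp only [Function.comp_apply, Nat.succ_eq_add_one]
    push_cast
    have e1 : (1 : Int) + 2 * ((k:Int)+1) - 1 = ((2*k+2 : Nat) : Int) := by push_cast; ring
    have e2 : (1 : Int) + 2 * ((k:Int)+1) = ((2*k+3 : Nat) : Int) := by push_cast; ring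
    have e3 : (1 : Int) + 2 * ((k:Int)+1) + 1 = ((2*k+4 : Nat) : Int) := by push_cast; ring
    have f1 : (1 : Int) + 2 * (k:Int) - 1 = ((2*k : Nat) : Int) := by push_cast; ring
    have f2 : (1 : Int) + 2 * (k:Int) = ((2*k+1 : Nat) : Int) := by push_cast; ring
    have f3 : (1 : Int) + 2 * (k:Int) + 1 = ((2*k+2 : Nat) : Int) := by push_cast; ring
    rw [e1, e3, e2, f1, f3, f2]
    simp only [PySem.List.pyGetD_natCast]
    rw [show 2*k+2 = (2*k)+1+1 from by omega, show 2*k+3 = (2*k+1)+1+1 from by omega,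
        show 2*k+4 = (2*k+2)+1+1 from by omega]
    simp

lemma pvA_eq_chunks (userData : List String) :
    parseDataIntoList userData = pvChunks userData := by
  induction userData using pvChunks.induct with
  | case1 => simp [parseDataIntoList, pvChunks, PySem.List.pyRange_of_pos (a := 1) (b := -1) (s := 2) (by norm_num)]
  | case2 x => simp [parseDataIntoList, pvChunks, PySem.List.pyRange_of_pos (a := 1) (b := 0) (s := 2) (by norm_num)]
  | case3 x y => simp [parseDataIntoList, pvChunks, PySem.List.pyRange_of_pos (a := 1) (b := 1) (s := 2) (by norm_num)]
  | case4 s a e t ih => rw [pvA_cons, ih, pvChunks]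

-- ===== VERDICT (by name: the statement is the Claim_ definition above) =====
theorem parseDataIntoList_spec : Claim_equal_parseDataIntoList := by
  intro userData _
  unfold Spec_parseDataIntoList
  rw [pvA_eq_chunks, pvB_eq_chunks]
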